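-- pv_equiv track=rewrite | github.com/kasittig/advent-of-code-2024 | py/solutions/day_2.py | is_report_safe
-- ===== SOURCE A (Python) =====
-- def is_pair_safe(entry_1: int, entry_2: int, increasing: bool) -> bool:
--     return (1 <= abs(entry_2 - entry_1) <= 3) and (
--         (entry_1 < entry_2 and increasing) or (entry_1 > entry_2 and not increasing)
--     )
--
-- def is_report_safe(report: list[int]) -> bool:
--     assert len(report) > 2
--     increasing: bool = report[0] < report[1]
--     safe: bool = True
--     for i in range(len(report) - 1):
--         safe = is_pair_safe(report[i], report[i + 1], increasing)
--         if not safe: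
--             break
--     return safe
-- ===== SOURCE B (Python) =====
-- def is_report_safe(report: list[int]) -> bool:
--     assert len(report) > 2
--     diffs = [report[i + 1] - report[i] for i in range(len(report) - 1)]
--     return all(1 <= d <= 3 for d in diffs) or all(-3 <= d <= -1 for d in diffs)
-- ===== Notes on version B (the rewrite author's own statement) =====
-- stated objective: simpler
-- what changed: Replaces the directional early-break pair loop with an 'increasing' flag by a consecutive-difference list checked with two universal range predicates (all ascending steps or all descending steps); the first diff's sign makes the wrong clause false, so the flag disappears.
import Mathlib
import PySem

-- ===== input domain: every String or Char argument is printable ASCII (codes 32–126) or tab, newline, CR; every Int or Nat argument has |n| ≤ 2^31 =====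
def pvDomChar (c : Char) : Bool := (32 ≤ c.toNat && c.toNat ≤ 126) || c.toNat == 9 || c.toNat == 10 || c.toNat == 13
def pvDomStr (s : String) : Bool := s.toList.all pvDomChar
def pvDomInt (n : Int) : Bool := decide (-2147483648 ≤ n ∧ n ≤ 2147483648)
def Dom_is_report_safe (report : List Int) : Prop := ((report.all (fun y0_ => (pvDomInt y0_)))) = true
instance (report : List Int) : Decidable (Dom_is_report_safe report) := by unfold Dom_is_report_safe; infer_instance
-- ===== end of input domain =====

-- B replaces A's directional early-break pair loop by a consecutive-difference list
-- checked with two universal predicates (objective: simpler).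

-- ===== PORT A =====
def is_pair_safe (entry_1 entry_2 : Int) (increasing : Bool) : Bool :=
  decide (1 ≤ |entry_2 - entry_1| ∧ |entry_2 - entry_1| ≤ 3) &&
    ((decide (entry_1 < entry_2) && increasing) || (decide (entry_1 > entry_2) && !increasing))

def is_report_safe (report : List Int) : Bool :=
  let increasing : Bool := decide (PySem.List.pyGetD report 0 0 < PySem.List.pyGetD report 1 0)
  -- the for-loop with 'break': once safe is false the loop stops, leaving safe false
  (PySem.List.pyRange 0 ((report.length : Int) - 1) 1).foldl
    (fun safe i =>
      if safe then
        is_pair_safe (PySem.List.pyGetD report i 0) (PySem.List.pyGetD report (i + 1) 0) increasing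
      else safe)
    true

-- ===== PORT B =====
def is_report_safe_alt (report : List Int) : Bool :=
  let diffs : List Int := (PySem.List.pyRange 0 ((report.length : Int) - 1) 1).map
    (fun i => PySem.List.pyGetD report (i + 1) 0 - PySem.List.pyGetD report i 0)
  diffs.all (fun d => decide (1 ≤ d ∧ d ≤ 3)) || diffs.all (fun d => decide (-3 ≤ d ∧ d ≤ -1))

-- ===== PRECONDITION & SPEC =====
-- A (and B) assert len(report) > 2 and raise AssertionError otherwise; Pre_ excludes exactly those inputs.
def Pre_is_report_safe (report : List Int) : Prop := 2 < report.length
instance (report : List Int) : Decidable (Pre_is_report_safe report) := by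
  unfold Pre_is_report_safe; infer_instance

def pvWitness_is_report_safe : List Int := [1, 2, 3]

def Spec_is_report_safe (report : List Int) (out : Bool) : Prop := out = is_report_safe_alt report
instance (report : List Int) (out : Bool) : Decidable (Spec_is_report_safe report out) := by
  unfold Spec_is_report_safe; infer_instance

-- ===== CLAIM (what is proved, stated in full; the proofs are below) =====
def Claim_equal_is_report_safe : Prop := ∀ (report : List Int), Dom_is_report_safe report → Pre_is_report_safe report → Spec_is_report_safe report (is_report_safe report)

-- ===== LEMMAS AND PROOFS =====

-- A's early-break loop computes 'all'
theorem foldl_break_all {α : Type} (f : α → Bool) (l : List α) (b : Bool) :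
    l.foldl (fun safe i => if safe then f i else safe) b = (b && l.all f) := by
  induction l generalizing b with
  | nil => simp
  | cons x xs ih =>
    cases b <;> cases h : f x <;> simp [List.foldl_cons, h, ih]

theorem all_congr_mem {α : Type} (l : List α) (f g : α → Bool)
    (h : ∀ x ∈ l, f x = g x) : l.all f = l.all g := by
  induction l with
  | nil => rfl
  | cons x xs ih =>
    simp only [List.all_cons, h x (by simp), ih (fun y hy => h y (by simp [hy]))]

theorem pair_true (x y : Int) :
    is_pair_safe x y true = decide (1 ≤ y - x ∧ y - x ≤ 3) := by
  rw [Bool.eq_iff_iff]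
  simp only [is_pair_safe, Bool.and_eq_true, Bool.or_eq_true, decide_eq_true_eq,
    Bool.and_true, Bool.not_true, Bool.and_false, Bool.false_eq_true, or_false]
  rcases abs_cases (y - x) with ⟨h1, _⟩ | ⟨h1, _⟩ <;> rw [h1] <;> omega

theorem pair_false (x y : Int) :
    is_pair_safe x y false = decide (-3 ≤ y - x ∧ y - x ≤ -1) := by
  rw [Bool.eq_iff_iff]
  simp only [is_pair_safe, Bool.and_eq_true, Bool.or_eq_true, decide_eq_true_eq,
    Bool.and_false, Bool.false_eq_true, false_or, Bool.not_false, Bool.and_true]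
  rcases abs_cases (y - x) with ⟨h1, _⟩ | ⟨h1, _⟩ <;> rw [h1] <;> omega

-- ===== VERDICT (by name: the statement is the Claim_ definition above) =====
theorem is_report_safe_spec : Claim_equal_is_report_safe := by
  intro report _ hpre
  unfold Spec_is_report_safe is_report_safe is_report_safe_alt
  have hlen : (2 : Int) < (report.length : Int) := by exact_mod_cast hpre
  set v0 := PySem.List.pyGetD report 0 0 with hv0
  set L := PySem.List.pyRange 0 ((report.length : Int) - 1) 1 with hL
  have h0L : (0 : Int) ∈ L := by
    rw [hL, PySem.List.mem_pyRange_one]; omega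
  have hall : ∀ (up : Bool) (p : Int → Int → Bool),
      (∀ x y, is_pair_safe x y up = p x y) →
      L.foldl (fun safe i => if safe then
          is_pair_safe (PySem.List.pyGetD report i 0) (PySem.List.pyGetD report (i + 1) 0) up
        else safe) true
      = L.all (fun i => p (PySem.List.pyGetD report i 0) (PySem.List.pyGetD report (i + 1) 0)) := by
    intro up p hp
    rw [foldl_break_all, Bool.true_and]
    exact all_congr_mem _ _ _ (fun i _ => hp _ _)
  simp only [List.all_map]
  by_cases hinc : v0 < PySem.List.pyGetD report 1 0
  · -- increasing: the descending clause fails at index 0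
    have hdn : L.all (fun i => decide (-3 ≤ PySem.List.pyGetD report (i + 1) 0 - PySem.List.pyGetD report i 0 ∧
        PySem.List.pyGetD report (i + 1) 0 - PySem.List.pyGetD report i 0 ≤ -1)) = false := by
      rw [List.all_eq_false]
      refine ⟨0, h0L, ?_⟩
      simp only [zero_add, decide_eq_true_eq, not_and]
      omega
    have hd : decide (v0 < PySem.List.pyGetD report 1 0) = true :=
      decide_eq_true (by rw [hv0]; exact hinc)
    rw [hd, hall true _ pair_true]
    simp only [Function.comp_def]
    rw [hdn, Bool.or_false]
  · -- not increasing: the ascending clause fails at index 0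
    have hup : L.all (fun i => decide (1 ≤ PySem.List.pyGetD report (i + 1) 0 - PySem.List.pyGetD report i 0 ∧
        PySem.List.pyGetD report (i + 1) 0 - PySem.List.pyGetD report i 0 ≤ 3)) = false := by
      rw [List.all_eq_false]
      refine ⟨0, h0L, ?_⟩
      simp only [zero_add, decide_eq_true_eq, not_and]
      omega
    have hd : decide (v0 < PySem.List.pyGetD report 1 0) = false :=
      decide_eq_false (by rw [hv0]; exact hinc)
    rw [hd, hall false _ pair_false]
    simp only [Function.comp_def]
    rw [hup, Bool.false_or]
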